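-- pv_equiv track=rewrite | github.com/Kimhyeonsuk/Programmers_Python | python_Algorithm/battle16/StarArray.py | solution
-- ===== SOURCE A (Python) =====
-- from collections import defaultdict
--
-- def solution(a):
--     answer = -1
--     if len(a)==1:
--         answer=0
--     dic=defaultdict(int)
--     for num in a:
--         dic[num]+=1
--     dic=dict(sorted(dic.items(),key=lambda x:x[1],reverse=True))
--     for key,value in dic.items():
--         if value*2>len(a):
--             continue
--         if value*2<answer:
--             break
--         idx=0
--         res=0
--         while idx<len(a)-1:
--             if a[idx]!=key and a[idx+1]==key:
--                 idx+=2
--                 res+=2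
--             elif a[idx]==key and a[idx+1]!=key:
--                 idx+=2
--                 res+=2
--             else:
--                 idx+=1
--         answer=max(answer,res)
--     return answer
-- ===== SOURCE B (Python) =====
-- def run_lengths(a, k):
--     # lengths of maximal constant runs of the indicator (x == k) over a
--     if not a:
--         return []
--     L = []
--     cur = (a[0] == k)
--     cnt = 1
--     for x in a[1:]:
--         b = (x == k)
--         if b == cur:
--             cnt += 1
--         else:
--             L.append(cnt)
--             cur = b
--             cnt = 1
--     L.append(cnt)
--     return L
--
--
-- def pairs(L):
--     # greedy boundary pairing over the run-length list
--     i = 0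
--     res = 0
--     while i + 1 < len(L):
--         res += 1
--         i += 2 if L[i + 1] == 1 else 1
--     return res
--
--
-- def solution(a):
--     n = len(a)
--     if n == 0:
--         return -1
--     if n == 1:
--         return 0
--     counts = {}
--     for x in a:
--         counts[x] = counts.get(x, 0) + 1
--     best = -1
--     for k, c in counts.items():
--         if 2 * c > n or 2 * c <= best:
--             # a key paired greedily never exceeds 2*c, so it cannot improve best
--             continue
--         best = max(best, 2 * pairs(run_lengths(a, k)))
--     return best
-- ===== Notes on version B (the rewrite author's own statement) =====
-- stated objective: faster
-- what changed: B drops A's count-sort and break machinery and replaces A's per-key element-by-element greedy rescan of the whole array by a run-length encoding of the key's indicator sequence with a greedy walk over the run lengths, iterating the counter directly and pruning any key whose 2*count cannot beat the current best.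
import Mathlib
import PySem

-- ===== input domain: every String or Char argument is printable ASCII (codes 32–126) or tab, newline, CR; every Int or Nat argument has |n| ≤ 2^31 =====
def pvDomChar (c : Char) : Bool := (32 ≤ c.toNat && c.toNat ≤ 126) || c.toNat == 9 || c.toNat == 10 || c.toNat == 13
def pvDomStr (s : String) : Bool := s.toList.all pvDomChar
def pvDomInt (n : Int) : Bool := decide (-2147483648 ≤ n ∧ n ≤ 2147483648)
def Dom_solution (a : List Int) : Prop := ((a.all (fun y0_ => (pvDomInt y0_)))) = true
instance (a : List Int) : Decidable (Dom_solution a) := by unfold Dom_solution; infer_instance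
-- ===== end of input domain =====

-- B replaces A's per-key element-by-element greedy rescans (after a count-sort with a break)
-- by a run-length encoding of each key's indicator sequence and a greedy walk over the run lengths,
-- iterating the counter directly with a sort-free 2*count prune; objective: faster (measured by the
-- timing run on the generated inputs); same return value on every input.

-- ===== PORT A =====
-- A's inner while loop over idx, as recursion on the suffix a[idx:]
def aWhile (key : Int) : List Int → Int
  | x :: y :: t =>
      if x ≠ key ∧ y = key then 2 + aWhile key t
      else if x = key ∧ y ≠ key then 2 + aWhile key t
      else aWhile key (y :: t)
  | _ => 0

-- A's outer for loop over the sorted (key, value) items, with `continue` and `break`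
def aLoop (a : List Int) : List (Int × Int) → Int → Int
  | [], ans => ans
  | (key, value) :: t, ans =>
      if value * 2 > (a.length : Int) then aLoop a t ans
      else if value * 2 < ans then ans
      else aLoop a t (max ans (aWhile key a))

def solution (a : List Int) : Int :=
  let answer : Int := if a.length = 1 then 0 else -1
  let dic : PySem.Dict Int Int :=
    a.foldl (fun d num => d.modify num 0 (· + 1)) PySem.Dict.empty
  let items := PySem.List.sorted dic.items (fun x => x.2) true
  aLoop a items answer

-- ===== PORT B =====
-- run_lengths' loop: state (cur, cnt), emitting each finished run length
def rlGo (k : Int) (cur : Bool) (cnt : Int) : List Int → List Int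
  | [] => [cnt]
  | x :: t =>
      let b := decide (x = k)
      if b = cur then rlGo k cur (cnt + 1) t
      else cnt :: rlGo k b 1 t

def runLengths (a : List Int) (k : Int) : List Int :=
  match a with
  | [] => []
  | x :: t => rlGo k (decide (x = k)) 1 t

-- pairs' while loop, as recursion on the suffix L[i:]
def pairsB : List Int → Int
  | _ :: y :: t => 1 + (if y = 1 then pairsB t else pairsB (y :: t))
  | _ => 0

def solution_alt (a : List Int) : Int :=
  let n : Int := (a.length : Int)
  if n = 0 then -1
  else if n = 1 then 0
  else
    let counts : PySem.Dict Int Int :=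
      a.foldl (fun d x => d.insert x (d.getD x 0 + 1)) PySem.Dict.empty
    counts.items.foldl
      (fun best kc =>
        if 2 * kc.2 > n ∨ 2 * kc.2 ≤ best then best
        else max best (2 * pairsB (runLengths a kc.1))) (-1)

-- ===== PRECONDITION & SPEC =====
def Spec_solution (a : List Int) (out : Int) : Prop := out = solution_alt a
instance (a : List Int) (out : Int) : Decidable (Spec_solution a out) := by unfold Spec_solution; infer_instance

-- ===== CLAIM (what is proved, stated in full; the proofs are below) =====
def Claim_equal_solution : Prop := ∀ (a : List Int), Dom_solution a → Spec_solution a (solution a)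

-- ===== LEMMAS AND PROOFS =====

-- the greedy scan only looks at the indicator (x == key)
def gB : List Bool → Int
  | x :: y :: t => if x ≠ y then 2 + gB t else gB (y :: t)
  | _ => 0

theorem aWhile_eq_gB (key : Int) (a : List Int) :
    aWhile key a = gB (a.map (fun x => decide (x = key))) := by
  induction a using aWhile.induct key with
  | case1 x y t h ih => simp_all [aWhile, gB]
  | case2 x y t h1 h2 ih => simp_all [aWhile, gB]
  | case3 x y t h1 h2 ih =>
      have hx : decide (x = key) = decide (y = key) := by
        by_cases hk : x = key <;> by_cases hy : y = key <;> simp_all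
      simp only [aWhile, if_neg h1, if_neg h2, ih, List.map_cons, gB, hx]
      simp
  | case4 t h => cases t with
      | nil => simp [aWhile, gB]
      | cons z u => cases u with
          | nil => simp [aWhile, gB]
          | cons _ _ => exact absurd rfl (h _ _ _)

def expandB (b : Bool) : List Int → List Bool
  | [] => []
  | l :: t => List.replicate l.toNat b ++ expandB (!b) t

theorem gB_replicate (m : Nat) (b : Bool) : gB (List.replicate m b) = 0 := by
  induction m with
  | zero => rfl
  | succ n ih =>
      cases n with
      | zero => rfl
      | succ p => simpa [List.replicate_succ, gB] using ih

theorem gB_replicate_append (m : Nat) (b : Bool) (rest : List Bool) :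
    gB (List.replicate (m + 1) b ++ (!b) :: rest) = 2 + gB rest := by
  induction m with
  | zero => simp [List.replicate_succ, gB]
  | succ p ih => simpa [List.replicate_succ, gB] using ih

theorem pairsB_cons_irrel (x y : Int) (t : List Int) : pairsB (x :: t) = pairsB (y :: t) := by
  cases t <;> simp [pairsB]

-- measure for the run-structure induction
def muL : List Int → Nat
  | [] => 0
  | l :: t => l.toNat + 1 + muL t

theorem gB_expand_aux (n : Nat) :
    ∀ L : List Int, muL L ≤ n → (∀ l ∈ L, 1 ≤ l) → ∀ b, gB (expandB b L) = 2 * pairsB L := by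
  induction n with
  | zero =>
      intro L hL _ b
      cases L with
      | nil => simp [expandB, gB, pairsB]
      | cons l t => simp [muL] at hL
  | succ n ih =>
      intro L hL hpos b
      cases L with
      | nil => simp [expandB, gB, pairsB]
      | cons l1 t1 =>
          cases t1 with
          | nil =>
              simp [expandB, gB_replicate, pairsB]
          | cons l2 t =>
              have h1 : 1 ≤ l1 := hpos l1 (by simp)
              have h2 : 1 ≤ l2 := hpos l2 (by simp)
              obtain ⟨m1, hm1⟩ : ∃ m, l1.toNat = m + 1 := ⟨l1.toNat - 1, by omega⟩
              obtain ⟨m2, hm2⟩ : ∃ m, l2.toNat = m + 1 := ⟨l2.toNat - 1, by omega⟩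
              have hexp : expandB b (l1 :: l2 :: t)
                  = List.replicate (m1 + 1) b ++ ((!b) :: (List.replicate m2 (!b) ++ expandB b t)) := by
                simp [expandB, hm1, hm2, List.replicate_succ]
              by_cases hl2 : l2 = 1
              · have hm20 : m2 = 0 := by omega
                have ht : gB (expandB b t) = 2 * pairsB t := by
                  refine ih t ?_ (fun l hl => hpos l (by simp [hl])) b
                  simp [muL] at hL ⊢; omega
                rw [hexp, gB_replicate_append, hm20]
                simp [pairsB, hl2, ht]
                ring
              · have hrec : List.replicate m2 (!b) ++ expandB b t = expandB (!b) ((l2 - 1) :: t) := by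
                  have : (l2 - 1).toNat = m2 := by omega
                  simp [expandB, this]
                have ht : gB (expandB (!b) ((l2 - 1) :: t)) = 2 * pairsB ((l2 - 1) :: t) := by
                  refine ih ((l2 - 1) :: t) ?_ ?_ (!b)
                  · simp [muL] at hL ⊢; omega
                  · intro l hl
                    rcases List.mem_cons.mp hl with rfl | hm
                    · omega
                    · exact hpos l (by simp [hm])
                rw [hexp, gB_replicate_append, hrec, ht, pairsB_cons_irrel (l2 - 1) l2]
                simp [pairsB, hl2]
                ring

theorem rlGo_expand (k : Int) :
    ∀ (t : List Int) (b : Bool) (cnt : Int), 1 ≤ cnt →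
      expandB b (rlGo k b cnt t) = List.replicate cnt.toNat b ++ t.map (fun x => decide (x = k)) := by
  intro t
  induction t with
  | nil => intro b cnt _; simp [rlGo, expandB]
  | cons x t ih =>
      intro b cnt hc
      by_cases hb : decide (x = k) = b
      · have hrec := ih b (cnt + 1) (by omega)
        have hrepl : (cnt + 1).toNat = cnt.toNat + 1 := by omega
        rw [show rlGo k b cnt (x :: t) = rlGo k b (cnt + 1) t from by simp [rlGo, hb]]
        rw [hrec, hrepl, List.replicate_succ']
        simp [hb, List.append_assoc]
      · have hb' : decide (x = k) = !b := by
          cases b <;> simp_all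
        rw [show rlGo k b cnt (x :: t) = cnt :: rlGo k (decide (x = k)) 1 t from by
          simp [rlGo, hb]]
        simp only [expandB, hb']
        rw [ih (!b) 1 le_rfl]
        simp [hb']

theorem rlGo_pos (k : Int) :
    ∀ (t : List Int) (b : Bool) (cnt : Int), 1 ≤ cnt → ∀ l ∈ rlGo k b cnt t, 1 ≤ l := by
  intro t
  induction t with
  | nil => intro b cnt hc l hl; simp [rlGo] at hl; omega
  | cons x t ih =>
      intro b cnt hc l hl
      by_cases hb : decide (x = k) = b
      · simp only [rlGo, hb] at hl
        exact ih b (cnt + 1) (by omega) l hl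
      · simp only [rlGo, if_neg hb] at hl
        rcases List.mem_cons.mp hl with rfl | hm
        · exact hc
        · exact ih _ 1 le_rfl l hm

-- the key per-candidate equality: A's element scan = B's run-length greedy
theorem aWhile_eq_pairs (k : Int) (a : List Int) :
    aWhile k a = 2 * pairsB (runLengths a k) := by
  cases a with
  | nil => simp [aWhile, runLengths, pairsB]
  | cons x t =>
      have hexp := rlGo_expand k t (decide (x = k)) 1 le_rfl
      have hpos := rlGo_pos k t (decide (x = k)) 1 le_rfl
      have := gB_expand_aux (muL (rlGo k (decide (x = k)) 1 t)) _ le_rfl hpos (decide (x = k))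
      rw [aWhile_eq_gB, runLengths]
      rw [← this, hexp]
      simp

-- A's greedy result is at most twice the candidate's multiplicity
theorem aWhile_le_count (key : Int) (a : List Int) :
    aWhile key a ≤ 2 * (a.count key : Int) := by
  induction a using aWhile.induct key with
  | case1 x y t h ih =>
      simp only [aWhile, if_pos h]
      have : (t.count key : Int) + 1 ≤ ((x :: y :: t).count key : Int) := by
        simp [List.count_cons, h.2]
        split_ifs <;> omega
      omega
  | case2 x y t h1 h2 ih =>
      simp only [aWhile, if_neg h1, if_pos h2]
      have : (t.count key : Int) + 1 ≤ ((x :: y :: t).count key : Int) := by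
        simp [List.count_cons, h2.1]
        split_ifs <;> omega
      omega
  | case3 x y t h1 h2 ih =>
      simp only [aWhile, if_neg h1, if_neg h2]
      have : ((y :: t).count key : Int) ≤ ((x :: y :: t).count key : Int) := by
        simp [List.count_cons]; omega
      omega
  | case4 t h => cases t with
      | nil => simp [aWhile]
      | cons z u => cases u with
          | nil => simp [aWhile]
          | cons _ _ => exact absurd rfl (h _ _ _)

-- the fold A's loop is compared against
def stepA (a : List Int) (b : Int) (p : Int × Int) : Int :=
  if p.2 * 2 > (a.length : Int) then b else max b (aWhile p.1 a)

theorem foldl_stepA_noop (a : List Int) :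
    ∀ (l : List (Int × Int)) (b : Int), (∀ p ∈ l, aWhile p.1 a ≤ b) →
      l.foldl (stepA a) b = b := by
  intro l
  induction l with
  | nil => intro b _; rfl
  | cons p t ih =>
      intro b hb
      have hstep : stepA a b p = b := by
        unfold stepA
        split_ifs with h
        · rfl
        · exact max_eq_left (hb p (by simp))
      simp only [List.foldl_cons, hstep]
      exact ih b (fun q hq => hb q (by simp [hq]))

theorem aLoop_eq_foldl (a : List Int) :
    ∀ (l : List (Int × Int)) (b : Int),
      l.Pairwise (fun p q => q.2 ≤ p.2) →
      (∀ p ∈ l, aWhile p.1 a ≤ 2 * p.2) →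
      aLoop a l b = l.foldl (stepA a) b := by
  intro l
  induction l with
  | nil => intro b _ _; rfl
  | cons p t ih =>
      intro b hpw hbd
      obtain ⟨k, v⟩ := p
      rw [List.pairwise_cons] at hpw
      by_cases h1 : v * 2 > (a.length : Int)
      · have hstep : stepA a b (k, v) = b := by simp [stepA, h1]
        simp only [aLoop, if_pos h1, List.foldl_cons, hstep]
        exact ih b hpw.2 (fun q hq => hbd q (by simp [hq]))
      · by_cases h2 : v * 2 < b
        · have hkv : aWhile k a ≤ 2 * v := by simpa using hbd (k, v) (by simp)
          have hstep : stepA a b (k, v) = b := by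
            simp [stepA, h1]
            omega
          simp only [aLoop, if_neg h1, if_pos h2, List.foldl_cons, hstep]
          refine (foldl_stepA_noop a t b ?_).symm
          intro q hq
          have hle := hpw.1 q hq
          have := hbd q (by simp [hq])
          omega
        · have hstep : stepA a b (k, v) = max b (aWhile k a) := by simp [stepA, h1]
          simp only [aLoop, if_neg h1, if_neg h2, List.foldl_cons, hstep]
          exact ih _ hpw.2 (fun q hq => hbd q (by simp [hq]))

theorem stepA_comm (a : List Int) :
    ∀ (p q : Int × Int) (b : Int), stepA a (stepA a b p) q = stepA a (stepA a b q) p := by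
  intro p q b
  unfold stepA
  split_ifs <;> simp [max_assoc, max_comm (aWhile p.1 a)]

-- B's pruned fold step; skipping a key with 2*c ≤ best is sound since its result is ≤ 2*c
def stepB (a : List Int) (b : Int) (p : Int × Int) : Int :=
  if 2 * p.2 > (a.length : Int) ∨ 2 * p.2 ≤ b then b else max b (aWhile p.1 a)

theorem foldl_stepB_eq_stepA (a : List Int) :
    ∀ (l : List (Int × Int)) (b : Int), (∀ p ∈ l, aWhile p.1 a ≤ 2 * p.2) →
      l.foldl (stepB a) b = l.foldl (stepA a) b := by
  intro l
  induction l with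
  | nil => intro b _; rfl
  | cons p t ih =>
      intro b hbd
      have hp := hbd p (by simp)
      have hstep : stepB a b p = stepA a b p := by
        unfold stepB stepA
        by_cases h1 : p.2 * 2 > (a.length : Int)
        · rw [if_pos (Or.inl (by omega)), if_pos h1]
        · rw [if_neg h1]
          by_cases h2 : 2 * p.2 ≤ b
          · rw [if_pos (Or.inr h2)]
            exact (max_eq_left (by omega)).symm
          · rw [if_neg (by omega)]
      simp only [List.foldl_cons, hstep]
      exact ih _ (fun q hq => hbd q (by simp [hq]))

-- the canonical items list of the counter of a
def itemsC (a : List Int) : List (Int × Int) :=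
  (PySem.Set.ofList a).map (fun k => (k, (a.count k : Int)))

theorem solution_eq_fold (a : List Int) :
    solution a = (itemsC a).foldl (stepA a) (if a.length = 1 then 0 else -1) := by
  rw [show solution a = aLoop a
      (PySem.List.sorted (PySem.Dict.counter a).items (fun x => x.2) true)
      (if a.length = 1 then 0 else -1) from rfl]
  have hitems : (PySem.Dict.counter a).items = itemsC a := PySem.Dict.items_counter a
  rw [hitems]
  have hperm : (PySem.List.sorted (itemsC a) (fun x => x.2) true).Perm (itemsC a) :=
    PySem.List.sorted_perm _ _ _
  have hbd : ∀ p ∈ PySem.List.sorted (itemsC a) (fun x : Int × Int => x.2) true,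
      aWhile p.1 a ≤ 2 * p.2 := by
    intro p hp
    have hp' : p ∈ itemsC a := (PySem.List.mem_sorted _ _ _ _).mp hp
    obtain ⟨k, _, rfl⟩ := List.mem_map.mp hp'
    exact aWhile_le_count k a
  rw [aLoop_eq_foldl a _ _ (PySem.List.sorted_pairwise_rev _ _) hbd]
  exact hperm.foldl_eq' (fun x _ y _ z => stepA_comm a x y z) _

theorem solution_alt_eq_fold (a : List Int) (h2 : 2 ≤ a.length) :
    solution_alt a = (itemsC a).foldl (stepA a) (-1) := by
  have h0 : ¬ ((a.length : Int) = 0) := by omega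
  have h1 : ¬ ((a.length : Int) = 1) := by omega
  rw [show solution_alt a = (if ((a.length : Int) = 0) then (-1 : Int)
      else if ((a.length : Int) = 1) then 0
      else (PySem.Dict.counter a).items.foldl
        (fun best kc =>
          if 2 * kc.2 > (a.length : Int) ∨ 2 * kc.2 ≤ best then best
          else max best (2 * pairsB (runLengths a kc.1))) (-1)) from rfl]
  simp only [h0, h1, if_false]
  rw [PySem.Dict.items_counter]
  have hstep : (fun (best : Int) (kc : Int × Int) =>
      if 2 * kc.2 > (a.length : Int) ∨ 2 * kc.2 ≤ best then best
      else max best (2 * pairsB (runLengths a kc.1))) = stepB a := by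
    funext b kc
    unfold stepB
    rw [aWhile_eq_pairs]
  rw [hstep]
  refine foldl_stepB_eq_stepA a _ _ ?_
  intro p hp
  obtain ⟨k, _, rfl⟩ := List.mem_map.mp hp
  exact aWhile_le_count k a

-- ===== VERDICT (by name: the statement is the Claim_ definition above) =====
theorem solution_spec : Claim_equal_solution := by
  intro a _
  unfold Spec_solution
  match ha : a with
  | [] => decide
  | [x] =>
      have : itemsC [x] = [(x, 1)] := by
        simp [itemsC, PySem.Set.ofList]
      rw [solution_eq_fold]
      simp only [this]
      simp [solution_alt, stepA, List.foldl]
  | x :: y :: t =>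
      rw [solution_eq_fold, solution_alt_eq_fold _ (by simp)]
      simp
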